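-- pv_equiv track=rewrite | github.com/sealinglip/leecode | 664.奇怪的打印机.py | strangePrinter
-- ===== SOURCE A (Python) =====
-- def strangePrinter(s: str) -> int:
--     # 记dp[i][j]为打印区间[i, j]的最小操作数
--     N = len(s)
--     dp = [[0] * N for _ in range(N)]
--
--     for i in range(N - 1, -1, -1):
--         dp[i][i] = 1
--         for j in range(i + 1, N):
--             if s[i] == s[j]:
--                 dp[i][j] = dp[i][j - 1]
--             else:
--                 dp[i][j] = min([dp[i][k] + dp[k + 1][j]
--                                 for k in range(i, j)])
--
--     return dp[0][N - 1]
-- ===== SOURCE B (Python) =====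
-- def strangePrinter(s: str) -> int:
--     # Top-down memoized recursion over intervals instead of A's bottom-up table fill.
--     memo = {}
--
--     def solve(i, j):
--         if j < i:
--             return 0
--         if j == i:
--             return 1
--         if (i, j) in memo:
--             return memo[(i, j)]
--         if s[i] == s[j]:
--             r = solve(i, j - 1)
--         else:
--             r = min(solve(i, k) + solve(k + 1, j) for k in range(i, j))
--         memo[(i, j)] = r
--         return r
--
--     return solve(0, len(s) - 1)
-- ===== Notes on version B (the rewrite author's own statement) =====
-- stated objective: alternative
-- what changed: A fills the whole N x N interval table bottom-up with two nested index loops; B replaces that with top-down memoized recursion over intervals.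
import Mathlib
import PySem

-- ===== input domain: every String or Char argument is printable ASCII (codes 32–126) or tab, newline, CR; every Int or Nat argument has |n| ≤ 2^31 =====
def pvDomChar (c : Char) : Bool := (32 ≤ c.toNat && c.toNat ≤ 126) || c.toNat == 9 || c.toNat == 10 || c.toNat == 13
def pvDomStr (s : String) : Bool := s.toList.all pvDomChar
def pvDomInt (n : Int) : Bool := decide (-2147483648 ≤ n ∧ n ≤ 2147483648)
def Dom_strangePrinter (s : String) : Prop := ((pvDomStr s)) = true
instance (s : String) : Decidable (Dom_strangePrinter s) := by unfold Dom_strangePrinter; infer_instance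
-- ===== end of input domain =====

-- B replaces A's bottom-up N x N table fill with top-down recursion over intervals
-- (memoized in Python; the memo only caches, so the port is the same recursion without it).


-- ===== PORT A =====
-- dp[i][j] read / write on A's 2-D list (all indices used are in range).
def pvDpGet (dp : List (List Int)) (i j : Nat) : Int := (dp.getD i []).getD j 0
def pvDpSet (dp : List (List Int)) (i j : Nat) (v : Int) : List (List Int) :=
  dp.set i ((dp.getD i []).set j v)

-- body of A's inner 'for j in range(i+1, N)' loop; s[i] is cs.getD i ' ' (i always in range here),
-- min([...]) is (PySem.List.min? … id).getD 0 (the list is never empty here), range(i,j) is List.range' i (j-i).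
def pvStepJ (cs : List Char) (i : Nat) (dp : List (List Int)) (j : Nat) : List (List Int) :=
  if cs.getD i ' ' == cs.getD j ' ' then
    pvDpSet dp i j (pvDpGet dp i (j - 1))
  else
    pvDpSet dp i j ((PySem.List.min?
      ((List.range' i (j - i)).map (fun k => pvDpGet dp i k + pvDpGet dp (k + 1) j))
      (fun x => x)).getD 0)

-- body of A's outer loop: dp[i][i] = 1 then the inner loop.
def pvStepI (cs : List Char) (N : Nat) (dp : List (List Int)) (i : Nat) : List (List Int) :=
  (List.range' (i + 1) (N - (i + 1))).foldl (pvStepJ cs i) (pvDpSet dp i i 1)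

-- literal port of A; range(N-1,-1,-1) over the Nat indices 0..N-1 is (List.range N).reverse.
def strangePrinter (s : String) : Int :=
  let cs := s.toList
  let N := cs.length
  let dp0 : List (List Int) := List.replicate N (List.replicate N 0)
  let dp := (List.range N).reverse.foldl (pvStepI cs N) dp0
  pvDpGet dp 0 (N - 1)

-- ===== PORT B =====
-- B's solve(i, j): top-down recursion on the interval [i, j] (Python indices here are ints,
-- always nonnegative and in range whenever the string is indexed).
def pvSolveB (cs : List Char) (i j : Int) : Int :=
  if h1 : j < i then 0
  else if h2 : j = i then 1
  else if cs.getD i.toNat ' ' == cs.getD j.toNat ' ' then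
    pvSolveB cs i (j - 1)
  else
    ((PySem.List.pyRange i j 1).attach.map
      (fun k => pvSolveB cs i k.1 + pvSolveB cs (k.1 + 1) j)
      |> (PySem.List.min? · (fun x => x))).getD 0
termination_by (j - i).toNat
decreasing_by
  · omega
  · have hk := PySem.List.mem_pyRange_one.mp k.2; omega
  · have hk := PySem.List.mem_pyRange_one.mp k.2; omega

def strangePrinter_alt (s : String) : Int :=
  pvSolveB s.toList 0 ((s.toList.length : Int) - 1)

-- ===== PRECONDITION & SPEC =====
-- Pre_ excludes only the empty string, on which A raises IndexError (dp[0][-1] on an empty table).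
def Pre_strangePrinter (s : String) : Prop := s ≠ ""
instance (s : String) : Decidable (Pre_strangePrinter s) := by unfold Pre_strangePrinter; infer_instance
def pvWitness_strangePrinter : String := "aba"

def Spec_strangePrinter (s : String) (out : Int) : Prop := out = strangePrinter_alt s
instance (s : String) (out : Int) : Decidable (Spec_strangePrinter s out) := by unfold Spec_strangePrinter; infer_instance

-- ===== CLAIM (what is proved, stated in full; the proofs are below) =====
def Claim_equal_strangePrinter : Prop := ∀ (s : String), Dom_strangePrinter s → Pre_strangePrinter s → Spec_strangePrinter s (strangePrinter s)

-- ===== LEMMAS AND PROOFS =====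

-- the table stays N x N
def pvRows (N : Nat) (dp : List (List Int)) : Prop := dp.length = N ∧ ∀ r ∈ dp, r.length = N

-- every row with index ≥ lo already holds solve's values
def pvInv (cs : List Char) (dp : List (List Int)) (lo : Nat) : Prop :=
  ∀ i j : Nat, lo ≤ i → i ≤ j → j < cs.length → pvDpGet dp i j = pvSolveB cs i j

theorem pvRows_set {N : Nat} {dp : List (List Int)} (h : pvRows N dp) {i : Nat} (hi : i < N)
    (j : Nat) (v : Int) : pvRows N (pvDpSet dp i j v) := by
  obtain ⟨h1, h2⟩ := h
  refine ⟨by simpa [pvDpSet] using h1, ?_⟩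
  intro r hr
  rcases List.mem_or_eq_of_mem_set hr with h | h
  · exact h2 r h
  · subst h
    rw [List.length_set, List.getD_eq_getElem _ _ (by omega)]
    exact h2 _ (List.getElem_mem (by omega))

theorem pvGet_set_same {N : Nat} {dp : List (List Int)} (h : pvRows N dp) {i j : Nat}
    (hi : i < N) (hj : j < N) (v : Int) : pvDpGet (pvDpSet dp i j v) i j = v := by
  obtain ⟨h1, h2⟩ := h
  have hi' : i < dp.length := by omega
  have hrow : (dp[i]?.getD []).length = N := by
    rw [← List.getD_eq_getElem?_getD, List.getD_eq_getElem _ _ hi']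
    exact h2 _ (List.getElem_mem hi')
  simp only [pvDpGet, pvDpSet, List.getD_eq_getElem?_getD,
    List.getElem?_set_self hi', Option.getD_some]
  rw [List.getElem?_set_self (by omega)]
  rfl

theorem pvGet_set_other {dp : List (List Int)} {i j i' j' : Nat}
    (hne : i ≠ i' ∨ j ≠ j') (v : Int) :
    pvDpGet (pvDpSet dp i j v) i' j' = pvDpGet dp i' j' := by
  rcases hne with hii | hjj
  · simp only [pvDpGet, pvDpSet, List.getD_eq_getElem?_getD, List.getElem?_set_ne hii]
  · by_cases hii : i = i'
    · subst hii
      simp only [pvDpGet, pvDpSet, List.getD_eq_getElem?_getD, List.getElem?_set]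
      by_cases hlen : i < dp.length
      · simp [hlen, List.getElem?_set_ne hjj]
      · simp [hlen]
    · simp only [pvDpGet, pvDpSet, List.getD_eq_getElem?_getD, List.getElem?_set_ne hii]

-- pvSolveB at Nat-cast arguments, base and step forms
theorem pvSolveB_refl (cs : List Char) (i : Nat) : pvSolveB cs i i = 1 := by
  rw [pvSolveB]; simp

theorem pvSolveB_step (cs : List Char) {i j : Nat} (hij : i < j) :
    pvSolveB cs i j =
      if cs.getD i ' ' == cs.getD j ' ' then pvSolveB cs i (j - 1 : Nat)
      else ((PySem.List.min?
        ((List.range' i (j - i)).map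
          (fun k : Nat => pvSolveB cs (i : Int) (k : Int) + pvSolveB cs ((k + 1 : Nat) : Int) (j : Int)))
        (fun x => x)).getD 0) := by
  rw [pvSolveB, dif_neg (by omega), dif_neg (by omega)]
  simp only [Int.toNat_natCast]
  by_cases hc : (cs.getD i ' ' == cs.getD j ' ') = true
  · rw [if_pos hc, if_pos hc]
    congr 1
    omega
  · rw [if_neg hc, if_neg hc]
    have hmap : (PySem.List.pyRange (i : Int) (j : Int) 1).attach.map
        (fun k => pvSolveB cs i k.1 + pvSolveB cs (k.1 + 1) j)
        = (PySem.List.pyRange (i : Int) (j : Int) 1).map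
        (fun k => pvSolveB cs i k + pvSolveB cs (k + 1) j) := by
      conv_rhs => rw [← List.attach_map_val]
    have hl : (PySem.List.pyRange (i : Int) (j : Int) 1).attach.map
        (fun k => pvSolveB cs i k.1 + pvSolveB cs (k.1 + 1) j)
        = (List.range' i (j - i)).map
          (fun k : Nat => pvSolveB cs (i : Int) (k : Int) + pvSolveB cs ((k + 1 : Nat) : Int) (j : Int)) := by
      rw [hmap, PySem.List.pyRange_one, List.map_map, List.range'_eq_map_range, List.map_map]
      have htn : ((j : Int) - (i : Int)).toNat = j - i := by omega
      rw [htn]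
      apply List.map_congr_left
      intro k hk
      simp only [Function.comp_apply]
      have e1 : ((i : Int) + (k : Int)) = ((i + k : Nat) : Int) := by push_cast; ring
      rw [e1]
      have e2 : (((i + k : Nat) : Int) + 1) = ((i + k + 1 : Nat) : Int) := by push_cast; ring
      rw [e2]
    rw [hl]

-- the inner loop: processes columns j = b, b+1, …, b+t-1 of row i
theorem pvInner (cs : List Char) {i : Nat} (hi : i < cs.length) :
    ∀ (t b : Nat) (dp : List (List Int)), i + 1 ≤ b → b + t ≤ cs.length →
    pvRows cs.length dp → pvInv cs dp (i + 1) →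
    (∀ j, i ≤ j → j < b → pvDpGet dp i j = pvSolveB cs i j) →
    pvRows cs.length ((List.range' b t).foldl (pvStepJ cs i) dp) ∧
    pvInv cs ((List.range' b t).foldl (pvStepJ cs i) dp) (i + 1) ∧
    (∀ j, i ≤ j → j < b + t →
      pvDpGet ((List.range' b t).foldl (pvStepJ cs i) dp) i j = pvSolveB cs i j) := by
  intro t
  induction t with
  | zero =>
    intro b dp hb hbt hR hI hrow
    simpa using ⟨hR, hI, fun j h1 h2 => hrow j h1 h2⟩
  | succ t ih =>
    intro b dp hb hbt hR hI hrow
    have hbN : b < cs.length := by omega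
    rw [List.range'_succ, List.foldl_cons]
    set dp1 := pvStepJ cs i dp b with hdp1
    have hR1 : pvRows cs.length dp1 := by
      rw [hdp1]; unfold pvStepJ; split <;> exact pvRows_set hR hi _ _
    have hI1 : pvInv cs dp1 (i + 1) := by
      intro i' j' h1 h2 h3
      rw [hdp1]; unfold pvStepJ
      split <;> rw [pvGet_set_other (Or.inl (by omega))] <;> exact hI i' j' h1 h2 h3
    have hrow1 : ∀ j, i ≤ j → j < b + 1 → pvDpGet dp1 i j = pvSolveB cs i j := by
      intro j hij hjb
      by_cases hj : j = b
      · subst hj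
        rw [hdp1, pvSolveB_step cs (by omega : i < j)]
        unfold pvStepJ
        split
        · rw [pvGet_set_same hR hi hbN]
          exact hrow (j - 1) (by omega) (by omega)
        · rw [pvGet_set_same hR hi hbN]
          have hl : (List.range' i (j - i)).map
              (fun k => pvDpGet dp i k + pvDpGet dp (k + 1) j)
              = (List.range' i (j - i)).map
                (fun k : Nat => pvSolveB cs (i : Int) (k : Int)
                  + pvSolveB cs ((k + 1 : Nat) : Int) (j : Int)) := by
            apply List.map_congr_left
            intro k hk
            have hk' : i ≤ k ∧ k < i + (j - i) := List.mem_range'_1.mp hk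
            congr 1
            · exact hrow k (by omega) (by omega)
            · exact hI (k + 1) j (by omega) (by omega) hbN
          rw [hl]
      · rw [hdp1]; unfold pvStepJ
        split <;> rw [pvGet_set_other (Or.inr (Ne.symm hj))] <;> exact hrow j hij (by omega)
    have := ih (b + 1) dp1 (by omega) (by omega) hR1 hI1 hrow1
    refine ⟨this.1, this.2.1, fun j h1 h2 => this.2.2 j h1 (by omega)⟩

-- the outer loop, i = a-1 down to 0
theorem pvOuter (cs : List Char) :
    ∀ (a : Nat) (dp : List (List Int)), a ≤ cs.length →
    pvRows cs.length dp → pvInv cs dp a →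
    pvRows cs.length ((List.range a).reverse.foldl (pvStepI cs cs.length) dp) ∧
    pvInv cs ((List.range a).reverse.foldl (pvStepI cs cs.length) dp) 0 := by
  intro a
  induction a with
  | zero => intro dp _ hR hI; simpa using ⟨hR, hI⟩
  | succ a ih =>
    intro dp ha hR hI
    rw [List.range_succ, List.reverse_append, List.reverse_singleton, List.singleton_append,
      List.foldl_cons]
    have haN : a < cs.length := by omega
    have hR1 : pvRows cs.length (pvDpSet dp a a 1) := pvRows_set hR haN _ _
    have hI1 : pvInv cs (pvDpSet dp a a 1) (a + 1) := by
      intro i' j' h1 h2 h3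
      rw [pvGet_set_other (Or.inl (by omega))]
      exact hI i' j' (by omega) h2 h3
    have hrow1 : ∀ j, a ≤ j → j < a + 1 → pvDpGet (pvDpSet dp a a 1) a j = pvSolveB cs a j := by
      intro j h1 h2
      have : j = a := by omega
      subst this
      rw [pvGet_set_same hR haN haN, pvSolveB_refl]
    have hin := pvInner cs haN (cs.length - (a + 1)) (a + 1) (pvDpSet dp a a 1)
      (by omega) (by omega) hR1 hI1 hrow1
    have hstep : pvStepI cs cs.length dp a =
        (List.range' (a + 1) (cs.length - (a + 1))).foldl (pvStepJ cs a) (pvDpSet dp a a 1) := rfl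
    rw [hstep]
    apply ih _ (by omega) hin.1
    intro i' j' h1 h2 h3
    by_cases hia : i' = a
    · subst hia; exact hin.2.2 j' h2 (by omega)
    · exact hin.2.1 i' j' (by omega) h2 h3

theorem pv_toList_ne_nil {s : String} (h : s ≠ "") : s.toList ≠ [] := by
  intro hnil
  apply h
  have : s.toList = ("" : String).toList := by simpa using hnil
  exact String.toList_inj.mp this

theorem strangePrinter_spec : Claim_equal_strangePrinter := by
  intro s _ hpre
  unfold Spec_strangePrinter strangePrinter strangePrinter_alt
  set cs := s.toList with hcs
  set N := cs.length with hN
  have hN1 : 1 ≤ N := by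
    have h1 := pv_toList_ne_nil hpre
    rw [← hcs] at h1
    have h2 := List.length_pos_of_ne_nil h1
    omega
  have hR0 : pvRows N (List.replicate N (List.replicate N (0 : Int))) := by
    refine ⟨by simp, ?_⟩
    intro r hr
    rw [List.eq_of_mem_replicate hr]; simp
  have hI0 : pvInv cs (List.replicate N (List.replicate N (0 : Int))) N := by
    intro i j h1 h2 h3
    rw [← hN] at h3
    omega
  have hout := pvOuter cs N (List.replicate N (List.replicate N (0 : Int))) le_rfl hR0 hI0
  have := hout.2 0 (N - 1) (by omega) (by omega) (by rw [← hN]; omega)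
  have hc2 : ((N - 1 : Nat) : Int) = (N : Int) - 1 := by omega
  have hc1 : (((0 : Nat) : Int)) = 0 := by simp
  rw [hc1, hc2] at this
  exact this
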